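-- pv_equiv track=rewrite | github.com/JosueCris/Topicos_IA | TIA/Filtros/ruidos_filtros.py | get_kernel_matriz
-- ===== SOURCE A (Python) =====
-- def get_kernel_matriz(matriz, i, j, size):
--     kernel = []
--     for a in range(size):
--         kernel.append(list())
--     aux = int(size/2)
--     it2 = 0
--     for it in range(i-aux, i+aux+1):
--         for jt in range(j-aux, j+aux+1):
--             if not ((0 <= it < len(matriz)) and (0 <= jt < len(matriz[0]))):
--                 kernel[it2].append([0, 0, 0])
--             else:
--                 kernel[it2].append([matriz[it][jt][0], matriz[it][jt][1], matriz[it][jt][2]])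
--         it2 += 1
--     return kernel
-- ===== SOURCE B (Python) =====
-- def get_kernel_matriz(matriz, i, j, size):
--     kernel = [[[0, 0, 0] for _ in range(size)] for _ in range(size)]
--     aux = int(size / 2)
--     r0 = i - aux
--     c0 = j - aux
--     rows = len(matriz)
--     cols = len(matriz[0]) if matriz else 0
--     for it in range(max(0, r0), min(rows, i + aux + 1)):
--         src = matriz[it]
--         for jt in range(max(0, c0), min(cols, j + aux + 1)):
--             px = src[jt]
--             kernel[it - r0][jt - c0] = [px[0], px[1], px[2]]
--     return kernel
-- ===== Notes on version B (the rewrite author's own statement) =====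
-- stated objective: alternative
-- what changed: B preallocates a size x size zero kernel and computes the clipped window/image intersection once, writing only those pixels in place, instead of A's append-per-cell loop with a bounds test on every window element.
import Mathlib
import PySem

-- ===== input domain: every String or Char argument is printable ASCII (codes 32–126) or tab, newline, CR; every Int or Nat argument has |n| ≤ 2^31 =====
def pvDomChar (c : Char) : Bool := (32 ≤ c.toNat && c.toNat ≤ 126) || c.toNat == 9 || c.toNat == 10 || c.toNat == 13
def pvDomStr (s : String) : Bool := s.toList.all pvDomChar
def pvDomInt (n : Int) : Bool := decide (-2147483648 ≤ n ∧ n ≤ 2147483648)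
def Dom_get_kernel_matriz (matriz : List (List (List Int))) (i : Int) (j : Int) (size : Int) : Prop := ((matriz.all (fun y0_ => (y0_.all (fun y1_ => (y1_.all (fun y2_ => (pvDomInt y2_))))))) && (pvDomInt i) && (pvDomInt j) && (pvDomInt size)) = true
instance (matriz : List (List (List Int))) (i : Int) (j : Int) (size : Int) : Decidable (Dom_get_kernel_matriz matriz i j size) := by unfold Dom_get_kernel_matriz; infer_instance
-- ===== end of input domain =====

-- B replaces A's per-element bounds test inside the doubly nested window loop by computing the
-- clipped window/image intersection once and concatenating zero padding + copied pixels per row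
-- (objective: alternative decomposition, same asymptotic cost).

-- ===== PORT A =====
-- literal port of A; kernel[it2].append is modelled by List.set at index it2 (it2 stays ≥ 0);
-- matriz[it][jt][k] uses pyGet?/getD — inside Pre_ every such access is in range, as in the Python.
def get_kernel_matriz (matriz : List (List (List Int))) (i : Int) (j : Int) (size : Int) : List (List (List Int)) :=
  let kernel : List (List (List Int)) :=
    (PySem.List.pyRange 0 size 1).foldl (fun k _ => k ++ [([] : List (List Int))]) []
  let aux : Int := size.tdiv 2    -- int(size/2): exact truncation toward zero for |size| ≤ 2^31
  let st :=
    (PySem.List.pyRange (i - aux) (i + aux + 1) 1).foldl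
      (fun (st : List (List (List Int)) × Int) it =>
        let k2 :=
          (PySem.List.pyRange (j - aux) (j + aux + 1) 1).foldl
            (fun (k : List (List (List Int))) jt =>
              let e : List Int :=
                if ¬ ((0 ≤ it ∧ it < (matriz.length : Int)) ∧
                      (0 ≤ jt ∧ jt < ((((PySem.List.pyGet? matriz 0).getD []).length : Int)))) then
                  [0, 0, 0]
                else
                  let row := (PySem.List.pyGet? matriz it).getD []
                  let px := (PySem.List.pyGet? row jt).getD []
                  [(PySem.List.pyGet? px 0).getD 0, (PySem.List.pyGet? px 1).getD 0,
                   (PySem.List.pyGet? px 2).getD 0]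
              k.set st.2.toNat ((k.getD st.2.toNat []) ++ [e]))
            st.1
        (k2, st.2 + 1))
      (kernel, (0 : Int))
  st.1

-- ===== PORT B =====
-- literal port of Source B: size×size zero grid preallocated, clipped row/column ranges computed
-- once, only the window/image intersection written in place (List.set models the assignment).
def get_kernel_matriz_alt (matriz : List (List (List Int))) (i : Int) (j : Int) (size : Int) : List (List (List Int)) :=
  let kernel : List (List (List Int)) :=
    (PySem.List.pyRange 0 size 1).map (fun _ => (PySem.List.pyRange 0 size 1).map (fun _ => ([0, 0, 0] : List Int)))
  let aux : Int := size.tdiv 2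
  let r0 := i - aux
  let c0 := j - aux
  let rows : Int := matriz.length
  let cols : Int := if matriz.isEmpty then 0 else (((PySem.List.pyGet? matriz 0).getD []).length : Int)
  (PySem.List.pyRange (max 0 r0) (min rows (i + aux + 1)) 1).foldl
    (fun (k : List (List (List Int))) it =>
      let src := (PySem.List.pyGet? matriz it).getD []
      (PySem.List.pyRange (max 0 c0) (min cols (j + aux + 1)) 1).foldl
        (fun (k : List (List (List Int))) jt =>
          let px := (PySem.List.pyGet? src jt).getD []
          k.set (it - r0).toNat ((k.getD (it - r0).toNat []).set (jt - c0).toNat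
            [(PySem.List.pyGet? px 0).getD 0, (PySem.List.pyGet? px 1).getD 0,
             (PySem.List.pyGet? px 2).getD 0]))
        k)
    kernel

-- ===== PRECONDITION & SPEC =====
-- Pre_ holds exactly where the Python A returns: either size ≤ -2 (both loops are empty, A
-- returns []) or size is odd and positive and every window position that passes A's bounds test
-- really is in range (the row is long enough and the pixel has ≥ 3 channels) — outside this A
-- raises IndexError (size ∈ {-1, 0} or even positive overruns kernel; a short row/pixel inside
-- the window fails matriz[it][jt][k]).
def Pre_get_kernel_matriz (matriz : List (List (List Int))) (i : Int) (j : Int) (size : Int) : Prop :=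
  size ≤ -2 ∨
  (1 ≤ size ∧ size % 2 = 1 ∧
    (∀ it ∈ List.range matriz.length,
      (i - size.tdiv 2 ≤ (it : Int) ∧ (it : Int) < i - size.tdiv 2 + size) →
      ∀ jt ∈ List.range (matriz.headD []).length,
        (j - size.tdiv 2 ≤ (jt : Int) ∧ (jt : Int) < j - size.tdiv 2 + size) →
        (jt < (matriz.getD it []).length ∧ 3 ≤ ((matriz.getD it []).getD jt []).length)))
instance (matriz : List (List (List Int))) (i : Int) (j : Int) (size : Int) : Decidable (Pre_get_kernel_matriz matriz i j size) := by unfold Pre_get_kernel_matriz; infer_instance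

def pvWitness_get_kernel_matriz : List (List (List Int)) × Int × Int × Int := ([[[1, 2, 3]]], 0, 0, 1)

def Spec_get_kernel_matriz (matriz : List (List (List Int))) (i : Int) (j : Int) (size : Int) (out : List (List (List Int))) : Prop := out = get_kernel_matriz_alt matriz i j size
instance (matriz : List (List (List Int))) (i : Int) (j : Int) (size : Int) (out : List (List (List Int))) : Decidable (Spec_get_kernel_matriz matriz i j size out) := by unfold Spec_get_kernel_matriz; infer_instance

-- ===== CLAIM (what is proved, stated in full; the proofs are below) =====
def Claim_equal_get_kernel_matriz : Prop := ∀ (matriz : List (List (List Int))) (i : Int) (j : Int) (size : Int), Dom_get_kernel_matriz matriz i j size → Pre_get_kernel_matriz matriz i j size → Spec_get_kernel_matriz matriz i j size (get_kernel_matriz matriz i j size)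

-- ===== LEMMAS AND PROOFS =====

-- the window element: exactly A's per-cell expression ([0,0,0] outside the image, the copied pixel inside)
def pvElem (m : List (List (List Int))) (it jt : Int) : List Int :=
  if ¬ ((0 ≤ it ∧ it < (m.length : Int)) ∧
        (0 ≤ jt ∧ jt < ((((PySem.List.pyGet? m 0).getD []).length : Int)))) then
    [0, 0, 0]
  else
    let row := (PySem.List.pyGet? m it).getD []
    let px := (PySem.List.pyGet? row jt).getD []
    [(PySem.List.pyGet? px 0).getD 0, (PySem.List.pyGet? px 1).getD 0,
     (PySem.List.pyGet? px 2).getD 0]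

-- the common normal form of both ports (positive size)
def pvSpec (m : List (List (List Int))) (i j size : Int) : List (List (List Int)) :=
  (List.range size.toNat).map (fun r : Nat =>
    (List.range size.toNat).map (fun c : Nat =>
      pvElem m (i - size.tdiv 2 + (r : Int)) (j - size.tdiv 2 + (c : Int))))

theorem pvSet_getD_self {α : Type} (k : List α) (n : Nat) (d : α) (h : n < k.length) :
    k.set n (k.getD n d) = k := by
  induction k generalizing n with
  | nil => simp at h
  | cons a l ih =>
    cases n with
    | zero => simp [List.getD]
    | succ n =>
      simp only [List.length_cons, Nat.add_lt_add_iff_right] at h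
      simp only [List.set_cons_succ, List.getD_cons_succ]
      rw [ih n h]

theorem pvGetD_set_self {α : Type} (k : List α) (n : Nat) (v d : α) (h : n < k.length) :
    (k.set n v).getD n d = v := by
  simp [List.getD, h]

theorem pvGetD_set_ne {α : Type} (k : List α) (n m : Nat) (v d : α) (h : n ≠ m) :
    (k.set n v).getD m d = k.getD m d := by
  simp [List.getD, List.getElem?_set_ne h]

theorem pvTake_set_succ {α : Type} (k : List α) (c : Nat) (v : α) (h : c < k.length) :
    (k.set c v).take (c + 1) = k.take c ++ [v] := by
  induction k generalizing c with
  | nil => simp at h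
  | cons a l ih =>
    cases c with
    | zero => simp
    | succ c => simp only [List.length_cons, Nat.add_lt_add_iff_right] at h
                simp [List.set, List.take, ih c h]

-- A's inner loop: appending elementwise into slot n is one appended row
theorem pvInnerFold (l : List Int) (k : List (List (List Int))) (n : Nat)
    (f : Int → List Int) (h : n < k.length) :
    l.foldl (fun k jt => k.set n ((k.getD n []) ++ [f jt])) k
      = k.set n ((k.getD n []) ++ l.map f) := by
  induction l generalizing k with
  | nil => simpa using (pvSet_getD_self k n [] h).symm
  | cons a l ih =>
    have h' : n < (k.set n ((k.getD n []) ++ [f a])).length := by simpa using h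
    simp only [List.foldl_cons, ih _ h', List.set_set,
      pvGetD_set_self k n _ [] h, List.map_cons]
    simp

-- A's outer loop: with rows c.. of k still empty, n steps fill rows c..c+n-1 with the window rows
theorem pvOuterFold (f : Int → Int → List Int) (cl ch : Int) (n : Nat) :
    ∀ (a : Int) (c : Nat) (k : List (List (List Int))),
    k.length = c + n → (∀ m : Nat, c ≤ m → k.getD m [] = []) →
    ((PySem.List.pyRange a (a + (n : Int)) 1).foldl
        (fun (st : List (List (List Int)) × Int) it =>
          ((PySem.List.pyRange cl ch 1).foldl
             (fun k jt => k.set st.2.toNat ((k.getD st.2.toNat []) ++ [f it jt])) st.1,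
           st.2 + 1))
        (k, (c : Int))).1
      = k.take c ++ (List.range n).map (fun r : Nat => (PySem.List.pyRange cl ch 1).map (f (a + (r : Int)))) := by
  induction n with
  | zero =>
    intro a c k hlen _
    rw [PySem.List.pyRange_one_eq_nil (show a + ((0:Nat):Int) ≤ a by simp)]
    simp [List.take_of_length_le (show k.length ≤ c by omega)]
  | succ n ih =>
    intro a c k hlen hempty
    rw [show a + ((n + 1 : Nat) : Int) = a + 1 + (n : Int) by push_cast; ring] at *
    rw [PySem.List.pyRange_one_cons (show a < a + 1 + (n:Int) by omega)]
    have hc : c < k.length := by omega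
    simp only [List.foldl_cons]
    have hstep : ((PySem.List.pyRange cl ch 1).foldl
        (fun k2 jt => k2.set ((c : Int)).toNat ((k2.getD ((c : Int)).toNat []) ++ [f a jt])) k)
        = k.set c ((PySem.List.pyRange cl ch 1).map (f a)) := by
      rw [show ((c : Int)).toNat = c from Int.toNat_natCast c,
         pvInnerFold _ k c (f a) hc, hempty c (le_refl c)]
      simp
    rw [hstep, show ((c : Int) + 1) = ((c + 1 : Nat) : Int) by push_cast; ring]
    rw [ih (a + 1) (c + 1) _ (by simpa using (by omega : k.length = (c+1) + n))
        (fun m hm => by rw [pvGetD_set_ne _ _ _ _ _ (by omega)]; exact hempty m (by omega))]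
    rw [pvTake_set_succ k c _ hc]
    rw [List.range_succ_eq_map, List.map_cons, List.map_map, List.append_assoc]
    have hcomp : ((fun r : Nat => (PySem.List.pyRange cl ch 1).map (f (a + (r : Int)))) ∘ Nat.succ)
        = (fun r : Nat => (PySem.List.pyRange cl ch 1).map (f (a + 1 + (r : Int)))) := by
      funext r
      simp only [Function.comp]
      congr 2
      push_cast
      ring
    rw [hcomp]
    simp

-- the pixel value B writes (exactly the port's expression)
def pvPix (m : List (List (List Int))) (it jt : Int) : List Int :=
  let px := (PySem.List.pyGet? ((PySem.List.pyGet? m it).getD []) jt).getD []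
  [(PySem.List.pyGet? px 0).getD 0, (PySem.List.pyGet? px 1).getD 0,
   (PySem.List.pyGet? px 2).getD 0]

theorem pvDrop_set {α : Type} (k : List α) (c m : Nat) (v : α) (h : c < m) :
    (k.set c v).drop m = k.drop m := by
  induction k generalizing c m with
  | nil => simp
  | cons a l ih =>
    cases c with
    | zero =>
      cases m with
      | zero => omega
      | succ m => simp
    | succ c =>
      cases m with
      | zero => omega
      | succ m =>
        simp only [List.set_cons_succ, List.drop_succ_cons]
        exact ih c m (by omega)

-- B's inner loop writes column by column into one fixed row slot
theorem pvInnerFoldB (l : List Int) (k : List (List (List Int))) (n : Nat) (c0 : Int)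
    (pix : Int → List Int) (h : n < k.length) :
    l.foldl (fun k jt => k.set n ((k.getD n []).set (jt - c0).toNat (pix jt))) k
      = k.set n (l.foldl (fun row jt => row.set (jt - c0).toNat (pix jt)) (k.getD n [])) := by
  induction l generalizing k with
  | nil => simpa using (pvSet_getD_self k n [] h).symm
  | cons a l ih =>
    have h' : n < (k.set n ((k.getD n []).set (a - c0).toNat (pix a))).length := by simpa using h
    simp only [List.foldl_cons, ih _ h', List.set_set, pvGetD_set_self k n _ [] h]

-- writing a contiguous block of cells into a row: take / new block / drop
theorem pvRowFoldRange {α : Type} (pix : Int → α) (c0 : Int) (nc : Nat) :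
    ∀ (b : Int) (row : List α), c0 ≤ b → (b - c0).toNat + nc ≤ row.length →
    (PySem.List.pyRange b (b + (nc : Int)) 1).foldl
        (fun row jt => row.set (jt - c0).toNat (pix jt)) row
      = row.take (b - c0).toNat ++ (List.range nc).map (fun t : Nat => pix (b + (t : Int)))
          ++ row.drop ((b - c0).toNat + nc) := by
  induction nc with
  | zero =>
    intro b row _ _
    rw [PySem.List.pyRange_one_eq_nil (show b + ((0 : Nat) : Int) ≤ b by simp)]
    simp
  | succ nc ih =>
    intro b row hb hlen
    rw [show b + ((nc + 1 : Nat) : Int) = b + 1 + (nc : Int) by push_cast; ring]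
    rw [PySem.List.pyRange_one_cons (show b < b + 1 + (nc : Int) by omega), List.foldl_cons]
    have hc : (b - c0).toNat < row.length := by omega
    rw [ih (b + 1) _ (by omega) (by simpa using (show (b + 1 - c0).toNat + nc ≤ row.length by omega))]
    rw [show (b + 1 - c0).toNat = (b - c0).toNat + 1 by omega]
    rw [pvTake_set_succ row _ _ hc, pvDrop_set row _ _ _ (by omega)]
    rw [List.range_succ_eq_map, List.map_cons, List.map_map]
    have hcomp : ((fun t : Nat => pix (b + (t : Int))) ∘ Nat.succ)
        = (fun t : Nat => pix (b + 1 + (t : Int))) := by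
      funext t
      simp only [Function.comp]
      congr 1
      push_cast
      ring
    rw [hcomp]
    simp
    omega

-- B's outer loop: rows a .. a+n-1 are written one by one into untouched (all-z) slots
theorem pvOuterFoldB (pix : Int → Int → List Int) (r0 c0 lc hc : Int) (n : Nat) :
    ∀ (a : Int) (k : List (List (List Int))) (z : List (List Int)), r0 ≤ a →
    (a - r0).toNat + n ≤ k.length →
    (∀ mm : Nat, (a - r0).toNat ≤ mm → mm < k.length → k.getD mm [] = z) →
    ((PySem.List.pyRange a (a + (n : Int)) 1).foldl
        (fun k it => (PySem.List.pyRange lc hc 1).foldl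
           (fun k jt => k.set (it - r0).toNat
              ((k.getD (it - r0).toNat []).set (jt - c0).toNat (pix it jt))) k)
        k)
      = k.take (a - r0).toNat
          ++ (List.range n).map (fun t : Nat => (PySem.List.pyRange lc hc 1).foldl
                (fun row jt => row.set (jt - c0).toNat (pix (a + (t : Int)) jt)) z)
          ++ k.drop ((a - r0).toNat + n) := by
  induction n with
  | zero =>
    intro a k z _ _ _
    rw [PySem.List.pyRange_one_eq_nil (show a + ((0 : Nat) : Int) ≤ a by simp)]
    simp
  | succ n ih =>
    intro a k z ha hlen hz
    rw [show a + ((n + 1 : Nat) : Int) = a + 1 + (n : Int) by push_cast; ring]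
    rw [PySem.List.pyRange_one_cons (show a < a + 1 + (n : Int) by omega), List.foldl_cons]
    have hkc : (a - r0).toNat < k.length := by omega
    rw [pvInnerFoldB _ k (a - r0).toNat c0 (pix a) hkc, hz _ (le_refl _) hkc]
    rw [ih (a + 1) _ z (by omega)
      (by simpa using (show (a + 1 - r0).toNat + n ≤ k.length by omega))
      (fun mm h1 h2 => by
        rw [pvGetD_set_ne _ _ _ _ _ (by omega)]
        exact hz mm (by omega) (by simpa using h2))]
    rw [show (a + 1 - r0).toNat = (a - r0).toNat + 1 by omega]
    rw [pvTake_set_succ k _ _ hkc, pvDrop_set k _ _ _ (by omega)]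
    rw [List.range_succ_eq_map, List.map_cons, List.map_map]
    have hcomp : ((fun t : Nat => (PySem.List.pyRange lc hc 1).foldl
          (fun row jt => row.set (jt - c0).toNat (pix (a + (t : Int)) jt)) z) ∘ Nat.succ)
        = (fun t : Nat => (PySem.List.pyRange lc hc 1).foldl
          (fun row jt => row.set (jt - c0).toNat (pix (a + 1 + (t : Int)) jt)) z) := by
      funext t
      simp only [Function.comp]
      congr 2
      funext row jt
      congr 2
      push_cast
      ring
    rw [hcomp]
    simp
    omega

-- a spec row whose source row is outside the image is all zeros
theorem pvSpecRow_zero (m : List (List (List Int))) (j size it : Int)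
    (h : ¬ (0 ≤ it ∧ it < (m.length : Int))) :
    (List.range size.toNat).map (fun c : Nat => pvElem m it (j - size.tdiv 2 + (c : Int)))
      = List.replicate size.toNat ([0, 0, 0] : List Int) := by
  refine List.eq_replicate_iff.mpr ⟨by simp, ?_⟩
  intro x hx
  obtain ⟨c, hcm, rfl⟩ := List.mem_map.mp hx
  simp only [pvElem]
  split
  · rfl
  · exfalso
    omega

-- one written row equals its spec row (source row inside the image, odd positive size)
theorem pvRowB2 (m : List (List (List Int))) (j size it : Int)
    (hpos : 1 ≤ size) (hodd : size % 2 = 1) (hit : 0 ≤ it ∧ it < (m.length : Int)) :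
    (PySem.List.pyRange (max 0 (j - size.tdiv 2)) (min (((PySem.List.pyGet? m 0).getD []).length : Int) (j + size.tdiv 2 + 1)) 1).foldl
        (fun row jt => row.set (jt - ((j - size.tdiv 2))).toNat (pvPix m it jt))
        (List.replicate size.toNat ([0, 0, 0] : List Int))
      = (List.range size.toNat).map (fun c : Nat => pvElem m it (j - size.tdiv 2 + (c : Int))) := by
  have hsz : ((size.toNat : Nat) : Int) = size := Int.toNat_of_nonneg (by omega)
  have haux : 2 * size.tdiv 2 + 1 = size := by
    rw [Int.tdiv_eq_ediv_of_nonneg (by omega)]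
    omega
  by_cases hcol : (min (((PySem.List.pyGet? m 0).getD []).length : Int) (j + size.tdiv 2 + 1)) ≤ (max 0 (j - size.tdiv 2))
  · rw [PySem.List.pyRange_one_eq_nil hcol]
    symm
    refine List.eq_replicate_iff.mpr ⟨by simp, ?_⟩
    intro x hx
    obtain ⟨c, hcm, rfl⟩ := List.mem_map.mp hx
    have hc' := List.mem_range.mp hcm
    simp only [pvElem]
    split
    · rfl
    · exfalso
      omega
  · push_neg at hcol
    rw [show (min (((PySem.List.pyGet? m 0).getD []).length : Int) (j + size.tdiv 2 + 1)) = (max 0 (j - size.tdiv 2)) + ((((min (((PySem.List.pyGet? m 0).getD []).length : Int) (j + size.tdiv 2 + 1) - (max 0 (j - size.tdiv 2))).toNat) : Nat) : Int) by omega]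
    refine Eq.trans (pvRowFoldRange (pvPix m it) ((j - size.tdiv 2)) ((min (((PySem.List.pyGet? m 0).getD []).length : Int) (j + size.tdiv 2 + 1) - (max 0 (j - size.tdiv 2))).toNat) (max 0 (j - size.tdiv 2))
      (List.replicate size.toNat ([0, 0, 0] : List Int)) (by omega) (by simp; omega)) ?_
    rw [List.take_replicate, List.drop_replicate]
    have hsplit : (List.range size.toNat).map (fun c : Nat => pvElem m it (j - size.tdiv 2 + (c : Int)))
        = ((List.range ((max 0 (j - size.tdiv 2) - (j - size.tdiv 2)).toNat)).map (fun c : Nat => pvElem m it (j - size.tdiv 2 + (c : Int))))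
          ++ ((List.range ((min (((PySem.List.pyGet? m 0).getD []).length : Int) (j + size.tdiv 2 + 1) - (max 0 (j - size.tdiv 2))).toNat)).map ((fun c : Nat => pvElem m it (j - size.tdiv 2 + (c : Int))) ∘ (fun x : Nat => ((max 0 (j - size.tdiv 2) - (j - size.tdiv 2)).toNat) + x)))
          ++ ((List.range ((j + size.tdiv 2 + 1 - (min (((PySem.List.pyGet? m 0).getD []).length : Int) (j + size.tdiv 2 + 1))).toNat)).map ((fun c : Nat => pvElem m it (j - size.tdiv 2 + (c : Int))) ∘ (fun x : Nat => (((max 0 (j - size.tdiv 2) - (j - size.tdiv 2)).toNat) + ((min (((PySem.List.pyGet? m 0).getD []).length : Int) (j + size.tdiv 2 + 1) - (max 0 (j - size.tdiv 2))).toNat)) + x))) := by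
      rw [show size.toNat = ((max 0 (j - size.tdiv 2) - (j - size.tdiv 2)).toNat) + ((min (((PySem.List.pyGet? m 0).getD []).length : Int) (j + size.tdiv 2 + 1) - (max 0 (j - size.tdiv 2))).toNat) + ((j + size.tdiv 2 + 1 - (min (((PySem.List.pyGet? m 0).getD []).length : Int) (j + size.tdiv 2 + 1))).toNat) by omega, List.range_add, List.range_add,
        List.map_append, List.map_append, List.map_map, List.map_map]
    rw [hsplit]
    congr 1
    congr 1
    · rw [show min ((max 0 (j - size.tdiv 2) - (j - size.tdiv 2)).toNat) size.toNat = ((max 0 (j - size.tdiv 2) - (j - size.tdiv 2)).toNat) by omega]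
      symm
      refine List.eq_replicate_iff.mpr ⟨by simp, ?_⟩
      intro x hx
      obtain ⟨c, hcm, rfl⟩ := List.mem_map.mp hx
      have hc' := List.mem_range.mp hcm
      simp only [pvElem]
      split
      · rfl
      · exfalso
        omega
    · apply List.map_congr_left
      intro x hx
      have hx' := List.mem_range.mp hx
      simp only [Function.comp_apply]
      rw [show j - size.tdiv 2 + ((((max 0 (j - size.tdiv 2) - (j - size.tdiv 2)).toNat) + x : Nat) : Int) = (max 0 (j - size.tdiv 2)) + (x : Int) by push_cast; omega]
      simp only [pvElem, pvPix]
      split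
      · exfalso
        omega
      · rfl
    · rw [show size.toNat - (((max 0 (j - size.tdiv 2) - (j - size.tdiv 2)).toNat) + ((min (((PySem.List.pyGet? m 0).getD []).length : Int) (j + size.tdiv 2 + 1) - (max 0 (j - size.tdiv 2))).toNat)) = ((j + size.tdiv 2 + 1 - (min (((PySem.List.pyGet? m 0).getD []).length : Int) (j + size.tdiv 2 + 1))).toNat) by omega]
      symm
      refine List.eq_replicate_iff.mpr ⟨by simp, ?_⟩
      intro x hx
      obtain ⟨c, hcm, rfl⟩ := List.mem_map.mp hx
      have hc' := List.mem_range.mp hcm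
      simp only [Function.comp_apply, pvElem]
      split
      · rfl
      · exfalso
        omega

-- B's port equals the normal form (odd positive size)
theorem pvB_eq_spec (m : List (List (List Int))) (i j size : Int)
    (hpos : 1 ≤ size) (hodd : size % 2 = 1) :
    get_kernel_matriz_alt m i j size = pvSpec m i j size := by
  have hsz : ((size.toNat : Nat) : Int) = size := Int.toNat_of_nonneg (by omega)
  have haux : 2 * size.tdiv 2 + 1 = size := by
    rw [Int.tdiv_eq_ediv_of_nonneg (by omega)]
    omega
  unfold get_kernel_matriz_alt
  simp only []
  have hz1 : (PySem.List.pyRange 0 size 1).map (fun _ => ([0, 0, 0] : List Int))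
      = List.replicate size.toNat ([0, 0, 0] : List Int) := by
    rw [List.map_const', PySem.List.length_pyRange_one]
    congr 1
    omega
  have hk0 : (PySem.List.pyRange 0 size 1).map
        (fun _ => (PySem.List.pyRange 0 size 1).map (fun _ => ([0, 0, 0] : List Int)))
      = List.replicate size.toNat (List.replicate size.toNat ([0, 0, 0] : List Int)) := by
    simp only [hz1]
    rw [List.map_const', PySem.List.length_pyRange_one]
    congr 1
    omega
  rw [hk0]
  by_cases hrow : (min (m.length : Int) (i + size.tdiv 2 + 1)) ≤ (max 0 (i - size.tdiv 2))
  · rw [PySem.List.pyRange_one_eq_nil hrow]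
    simp only [List.foldl_nil]
    unfold pvSpec
    symm
    refine List.eq_replicate_iff.mpr ⟨by simp, ?_⟩
    intro x hx
    obtain ⟨r, hrm, rfl⟩ := List.mem_map.mp hx
    have hr' := List.mem_range.mp hrm
    exact pvSpecRow_zero m j size _ (by omega)
  · push_neg at hrow
    rw [show (min (m.length : Int) (i + size.tdiv 2 + 1)) = (max 0 (i - size.tdiv 2)) + ((((min (m.length : Int) (i + size.tdiv 2 + 1) - (max 0 (i - size.tdiv 2))).toNat) : Nat) : Int) by omega]
    refine Eq.trans (pvOuterFoldB (pvPix m) ((i - size.tdiv 2)) ((j - size.tdiv 2)) (max 0 (j - size.tdiv 2)) (min (if m.isEmpty then 0 else (((PySem.List.pyGet? m 0).getD []).length : Int)) (j + size.tdiv 2 + 1)) ((min (m.length : Int) (i + size.tdiv 2 + 1) - (max 0 (i - size.tdiv 2))).toNat) (max 0 (i - size.tdiv 2))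
      (List.replicate size.toNat (List.replicate size.toNat ([0, 0, 0] : List Int)))
      (List.replicate size.toNat ([0, 0, 0] : List Int))
      (by omega) (by simp; omega)
      (fun mm h1 h2 => by
        simp only [List.length_replicate] at h2
        simp [List.getD, h2])) ?_
    rw [List.take_replicate, List.drop_replicate]
    have hmne : m.isEmpty = false := by
      cases m with
      | nil =>
        exfalso
        simp only [List.length_nil, Nat.cast_zero] at hrow
        omega
      | cons hd tl => rfl
    simp only [hmne, Bool.false_eq_true, if_false]
    unfold pvSpec
    have hsplit : ∀ (G : Nat → List (List Int)),
        (List.range size.toNat).map G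
          = ((List.range ((max 0 (i - size.tdiv 2) - (i - size.tdiv 2)).toNat)).map G)
            ++ ((List.range ((min (m.length : Int) (i + size.tdiv 2 + 1) - (max 0 (i - size.tdiv 2))).toNat)).map (G ∘ (fun x : Nat => ((max 0 (i - size.tdiv 2) - (i - size.tdiv 2)).toNat) + x)))
            ++ ((List.range ((i + size.tdiv 2 + 1 - (min (m.length : Int) (i + size.tdiv 2 + 1))).toNat)).map (G ∘ (fun x : Nat => (((max 0 (i - size.tdiv 2) - (i - size.tdiv 2)).toNat) + ((min (m.length : Int) (i + size.tdiv 2 + 1) - (max 0 (i - size.tdiv 2))).toNat)) + x))) := by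
      intro G
      rw [show size.toNat = ((max 0 (i - size.tdiv 2) - (i - size.tdiv 2)).toNat) + ((min (m.length : Int) (i + size.tdiv 2 + 1) - (max 0 (i - size.tdiv 2))).toNat) + ((i + size.tdiv 2 + 1 - (min (m.length : Int) (i + size.tdiv 2 + 1))).toNat) by omega, List.range_add, List.range_add,
        List.map_append, List.map_append, List.map_map, List.map_map]
    rw [hsplit (fun r : Nat =>
            (List.range size.toNat).map (fun c : Nat =>
              pvElem m (i - size.tdiv 2 + (r : Int)) (j - size.tdiv 2 + (c : Int))))]
    congr 1
    congr 1
    · rw [show min ((max 0 (i - size.tdiv 2) - (i - size.tdiv 2)).toNat) size.toNat = ((max 0 (i - size.tdiv 2) - (i - size.tdiv 2)).toNat) by omega]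
      symm
      refine List.eq_replicate_iff.mpr ⟨by simp, ?_⟩
      intro x hx
      obtain ⟨r, hrm, rfl⟩ := List.mem_map.mp hx
      have hr' := List.mem_range.mp hrm
      exact pvSpecRow_zero m j size _ (by omega)
    · apply List.map_congr_left
      intro x hx
      have hx' := List.mem_range.mp hx
      simp only [Function.comp_apply]
      rw [show i - size.tdiv 2 + ((((max 0 (i - size.tdiv 2) - (i - size.tdiv 2)).toNat) + x : Nat) : Int) = (max 0 (i - size.tdiv 2)) + (x : Int) by push_cast; omega]
      exact pvRowB2 m j size _ hpos hodd ⟨by omega, by omega⟩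
    · rw [show size.toNat - (((max 0 (i - size.tdiv 2) - (i - size.tdiv 2)).toNat) + ((min (m.length : Int) (i + size.tdiv 2 + 1) - (max 0 (i - size.tdiv 2))).toNat)) = ((i + size.tdiv 2 + 1 - (min (m.length : Int) (i + size.tdiv 2 + 1))).toNat) by omega]
      symm
      refine List.eq_replicate_iff.mpr ⟨by simp, ?_⟩
      intro x hx
      obtain ⟨r, hrm, rfl⟩ := List.mem_map.mp hx
      have hr' := List.mem_range.mp hrm
      simp only [Function.comp_apply]
      exact pvSpecRow_zero m j size _ (by omega)

-- A's port equals the normal form (odd positive size)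
theorem pvA_eq_spec (m : List (List (List Int))) (i j size : Int)
    (hpos : 1 ≤ size) (hodd : size % 2 = 1) :
    get_kernel_matriz m i j size = pvSpec m i j size := by
  have hsz : ((size.toNat : Nat) : Int) = size := Int.toNat_of_nonneg (by omega)
  have haux : 2 * size.tdiv 2 + 1 = size := by
    rw [Int.tdiv_eq_ediv_of_nonneg (by omega)]
    omega
  unfold get_kernel_matriz
  simp only []
  have hinit : (PySem.List.pyRange 0 size 1).foldl
      (fun k _ => k ++ [([] : List (List Int))]) []
      = List.replicate size.toNat ([] : List (List Int)) := by
    rw [PySem.List.foldl_append_singleton_eq_map]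
    simp [List.map_const', PySem.List.length_pyRange_one]
  rw [hinit, show i + size.tdiv 2 + 1 = (i - size.tdiv 2) + ((size.toNat : Nat) : Int) by omega]
  refine Eq.trans (pvOuterFold (pvElem m) (j - size.tdiv 2) (j + size.tdiv 2 + 1) size.toNat
    (i - size.tdiv 2) 0 (List.replicate size.toNat []) (by simp)
    (fun mm _ => by simp [List.getD, List.getElem?_replicate]; split <;> rfl)) ?_
  simp only [List.take_zero, List.nil_append, pvSpec]
  apply List.map_congr_left
  intro r _
  rw [PySem.List.pyRange_one,
    show j + size.tdiv 2 + 1 - (j - size.tdiv 2) = size by omega, List.map_map]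
  rfl

-- degenerate case: size ≤ -2, both ports return []
theorem pvA_neg (m : List (List (List Int))) (i j size : Int) (h : size ≤ -2) :
    get_kernel_matriz m i j size = [] := by
  have e1 : ((-size).tdiv 2) = (-size) / 2 := Int.tdiv_eq_ediv_of_nonneg (by omega)
  have e2 : (-size).tdiv 2 = -(size.tdiv 2) := Int.neg_tdiv ..
  unfold get_kernel_matriz
  simp only []
  rw [PySem.List.pyRange_one_eq_nil (show size ≤ (0 : Int) by omega),
    PySem.List.pyRange_one_eq_nil (show i + size.tdiv 2 + 1 ≤ i - size.tdiv 2 by omega)]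
  simp

theorem pvB_neg (m : List (List (List Int))) (i j size : Int) (h : size ≤ -2) :
    get_kernel_matriz_alt m i j size = [] := by
  have e1 : ((-size).tdiv 2) = (-size) / 2 := Int.tdiv_eq_ediv_of_nonneg (by omega)
  have e2 : (-size).tdiv 2 = -(size.tdiv 2) := Int.neg_tdiv ..
  unfold get_kernel_matriz_alt
  simp only []
  rw [PySem.List.pyRange_one_eq_nil (show size ≤ (0 : Int) by omega),
    PySem.List.pyRange_one_eq_nil
      (show min (m.length : Int) (i + size.tdiv 2 + 1) ≤ max 0 (i - size.tdiv 2) by omega)]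
  simp

-- ===== VERDICT (by name: the statement is the Claim_ definition above) =====
theorem get_kernel_matriz_spec : Claim_equal_get_kernel_matriz := by
  intro m i j size _ hpre
  unfold Spec_get_kernel_matriz
  rcases hpre with hneg | ⟨hpos, hodd, _⟩
  · rw [pvA_neg m i j size hneg, pvB_neg m i j size hneg]
  · rw [pvA_eq_spec m i j size hpos hodd, pvB_eq_spec m i j size hpos hodd]
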